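-- pv_equiv track=rewrite | github.com/colemars/contextizer | contextizer/digest/prompts.py | _sections_block
-- ===== SOURCE A (Python) =====
-- _PLACEMENT_DESCRIPTIONS = {
--     "after_tldr": "immediately after the TL;DR, before topic paragraphs",
--     "topic": "as one of the topic paragraphs (counts toward the topic-paragraph floor)",
--     "after_topics": "after topic paragraphs, before the pipeline-appended \"Also in today's feed\" list",
-- }
--
-- def _sections_block(sections: list[dict] | None) -> str:
--     if not sections:
--         return ""
--
--     # Group by placement so the LLM sees ordering semantics clearly.
--     by_placement: dict[str, list[dict]] = {"after_tldr": [], "topic": [], "after_topics": []}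
--     for s in sections:
--         placement = (s.get("placement") or "after_topics").lower()
--         if placement not in by_placement:
--             placement = "after_topics"
--         by_placement[placement].append(s)
--
--     lines: list[str] = ["## Required priority sections", ""]
--     lines.append(
--         "Each section below is a structural requirement. When at least `min` "
--         "items in the feed match its criteria, the section is **mandatory** "
--         "and must appear with its specified shape. Items that qualify for a "
--         "priority section MUST NOT also appear in topic paragraphs or in any "
--         "other priority section. Skip a section entirely if fewer than its "
--         "`min` items qualify."
--     )
--     lines.append("")
--     lines.append(
--         "Order in the document: TL;DR → after_tldr sections (in array order) → "
--         "topic paragraphs interleaved with topic sections → after_topics sections "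
--         "(in array order) → pipeline-appended \"Also in today's feed\"."
--     )
--     lines.append("")
--
--     for placement_key in ("after_tldr", "topic", "after_topics"):
--         for s in by_placement[placement_key]:
--             name = s.get("name") or "(unnamed section)"
--             placement_text = _PLACEMENT_DESCRIPTIONS[placement_key]
--             when = s.get("when") or "(no criteria specified — skip if unclear)"
--             shape = s.get("shape") or "paragraph, prose, cite items inline as `[Title](link)`"
--             mn = int(s.get("min", 1))
--             mx = int(s.get("max", 5))
--             lines.extend([
--                 f"### {name}",
--                 f"- **Placement**: {placement_text}",
--                 f"- **When**: {when}",
--                 f"- **Shape**: {shape}",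
--                 f"- **Items**: {mn}–{mx}; skip section entirely if fewer than {mn} qualifying items exist today",
--                 "",
--             ])
--
--     return "\n".join(lines).rstrip() + "\n"
-- ===== SOURCE B (Python) =====
-- _PLACEMENTS = (
--     ("after_tldr", "immediately after the TL;DR, before topic paragraphs"),
--     ("topic", "as one of the topic paragraphs (counts toward the topic-paragraph floor)"),
--     ("after_topics", "after topic paragraphs, before the pipeline-appended \"Also in today's feed\" list"),
-- )
--
-- _HEADER = (
--     "## Required priority sections\n\n"
--     "Each section below is a structural requirement. When at least `min` "
--     "items in the feed match its criteria, the section is **mandatory** "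
--     "and must appear with its specified shape. Items that qualify for a "
--     "priority section MUST NOT also appear in topic paragraphs or in any "
--     "other priority section. Skip a section entirely if fewer than its "
--     "`min` items qualify.\n\n"
--     "Order in the document: TL;DR → after_tldr sections (in array order) → "
--     "topic paragraphs interleaved with topic sections → after_topics sections "
--     "(in array order) → pipeline-appended \"Also in today's feed\".\n\n"
-- )
--
--
-- def _norm_placement(s):
--     p = (s.get("placement") or "after_topics").lower()
--     return p if p in ("after_tldr", "topic", "after_topics") else "after_topics"
--
--
-- def _block(s, desc):
--     name = s.get("name") or "(unnamed section)"
--     when = s.get("when") or "(no criteria specified — skip if unclear)"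
--     shape = s.get("shape") or "paragraph, prose, cite items inline as `[Title](link)`"
--     mn = int(s.get("min", 1))
--     mx = int(s.get("max", 5))
--     return (
--         f"### {name}\n"
--         f"- **Placement**: {desc}\n"
--         f"- **When**: {when}\n"
--         f"- **Shape**: {shape}\n"
--         f"- **Items**: {mn}\u2013{mx}; skip section entirely if fewer than {mn} qualifying items exist today"
--     )
--
--
-- def _sections_block(sections):
--     if not sections:
--         return ""
--     blocks = [
--         _block(s, desc)
--         for key, desc in _PLACEMENTS
--         for s in sections
--         if _norm_placement(s) == key
--     ]
--     return _HEADER + "\n\n".join(blocks) + "\n"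
-- ===== Notes on version B (the rewrite author's own statement) =====
-- stated objective: alternative
-- what changed: B eliminates A's by_placement grouping dict and line-list-plus-rstrip assembly: it makes three filtering scans over the raw sections list (one per placement key) and concatenates whole per-section block strings onto a constant header, with no intermediate table and no trailing-whitespace pass.
import Mathlib
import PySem

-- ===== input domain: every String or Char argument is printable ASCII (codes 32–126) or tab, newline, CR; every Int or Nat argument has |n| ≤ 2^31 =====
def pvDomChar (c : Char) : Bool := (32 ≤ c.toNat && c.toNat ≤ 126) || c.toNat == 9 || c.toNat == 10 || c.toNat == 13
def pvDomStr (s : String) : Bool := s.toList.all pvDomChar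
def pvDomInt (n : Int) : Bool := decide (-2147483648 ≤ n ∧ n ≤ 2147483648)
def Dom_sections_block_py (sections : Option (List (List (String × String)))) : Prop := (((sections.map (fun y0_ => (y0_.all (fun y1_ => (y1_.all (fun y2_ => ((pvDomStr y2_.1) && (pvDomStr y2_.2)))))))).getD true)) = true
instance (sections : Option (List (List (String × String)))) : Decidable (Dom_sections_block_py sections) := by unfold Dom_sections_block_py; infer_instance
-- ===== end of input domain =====

set_option maxHeartbeats 10000000


-- B replaces A's grouping dict by three filtering scans over the raw list and builds the
-- markdown directly from whole-block strings instead of a line list + rstrip (objective: alternative).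

-- shared helpers: Python d.get(k) on an insertion-ordered dict (first match), `x or dflt` on strings,
-- and int(x) with an int default (parse failure = ValueError is excluded by Pre_; the port
-- returns the junk value 0 there, outside the claim)
def pvGet (d : List (String × String)) (k : String) : Option String :=
  (d.find? (fun p => p.1 == k)).map (fun p => p.2)

def pvOr (v : Option String) (dflt : String) : String :=
  match v with
  | some s => if s = "" then dflt else s
  | none => dflt

def pvIntOf (v : Option String) (dflt : Int) : Int :=
  match v with
  | some s => (PySem.Int.ofStr? s).getD 0
  | none => dflt

def pvDesc1 : String := "immediately after the TL;DR, before topic paragraphs"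
def pvDesc2 : String := "as one of the topic paragraphs (counts toward the topic-paragraph floor)"
def pvDesc3 : String := "after topic paragraphs, before the pipeline-appended \"Also in today's feed\" list"

def pvHdr1 : String := "Each section below is a structural requirement. When at least `min` items in the feed match its criteria, the section is **mandatory** and must appear with its specified shape. Items that qualify for a priority section MUST NOT also appear in topic paragraphs or in any other priority section. Skip a section entirely if fewer than its `min` items qualify."
def pvHdr2 : String := "Order in the document: TL;DR → after_tldr sections (in array order) → topic paragraphs interleaved with topic sections → after_topics sections (in array order) → pipeline-appended \"Also in today's feed\"."

-- ===== PORT A =====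
-- _PLACEMENT_DESCRIPTIONS[key] (key is always one of the three keys when A indexes it)
def pvDesc (k : String) : String :=
  if k = "after_tldr" then pvDesc1 else if k = "topic" then pvDesc2 else pvDesc3

-- the six lines lines.extend([...]) appends for one section
def pvLinesA (s : List (String × String)) (key : String) : List String :=
  let name := pvOr (pvGet s "name") "(unnamed section)"
  let placement_text := pvDesc key
  let when := pvOr (pvGet s "when") "(no criteria specified — skip if unclear)"
  let shape := pvOr (pvGet s "shape") "paragraph, prose, cite items inline as `[Title](link)`"
  let mn := pvIntOf (pvGet s "min") 1
  let mx := pvIntOf (pvGet s "max") 5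
  ["### " ++ name,
   "- **Placement**: " ++ placement_text,
   "- **When**: " ++ when,
   "- **Shape**: " ++ shape,
   "- **Items**: " ++ PySem.Int.toStr mn ++ "–" ++ PySem.Int.toStr mx ++ "; skip section entirely if fewer than " ++ PySem.Int.toStr mn ++ " qualifying items exist today",
   ""]

-- body of A's grouping loop
def pvStepA (d : PySem.Dict String (List (List (String × String)))) (s : List (String × String)) :
    PySem.Dict String (List (List (String × String))) :=
  let placement := PySem.Str.lower (pvOr (pvGet s "placement") "after_topics")
  let placement2 := if d.contains placement then placement else "after_topics"
  d.modify placement2 [] (fun l => l ++ [s])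

def sections_block_py (sections : Option (List (List (String × String)))) : String :=
  match sections with
  | none => ""
  | some secs =>
    if secs = [] then ""
    else
      let init : PySem.Dict String (List (List (String × String))) :=
        ((PySem.Dict.empty.insert "after_tldr" []).insert "topic" []).insert "after_topics" []
      let byPlacement := secs.foldl pvStepA init
      let lines0 : List String := ["## Required priority sections", "", pvHdr1, "", pvHdr2, ""]
      let lines := ["after_tldr", "topic", "after_topics"].foldl
        (fun lines key =>
          (byPlacement.getD key []).foldl (fun lines s => lines ++ pvLinesA s key) lines)
        lines0
      PySem.Str.rstrip (PySem.Str.join "\n" lines) ++ "\n"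

-- ===== PORT B =====
def pvNorm (s : List (String × String)) : String :=
  let p := PySem.Str.lower (pvOr (pvGet s "placement") "after_topics")
  if p = "after_tldr" ∨ p = "topic" ∨ p = "after_topics" then p else "after_topics"

def pvBlock (s : List (String × String)) (desc : String) : String :=
  let name := pvOr (pvGet s "name") "(unnamed section)"
  let when := pvOr (pvGet s "when") "(no criteria specified — skip if unclear)"
  let shape := pvOr (pvGet s "shape") "paragraph, prose, cite items inline as `[Title](link)`"
  let mn := pvIntOf (pvGet s "min") 1
  let mx := pvIntOf (pvGet s "max") 5
  "### " ++ name ++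
  "\n- **Placement**: " ++ desc ++
  "\n- **When**: " ++ when ++
  "\n- **Shape**: " ++ shape ++
  "\n- **Items**: " ++ PySem.Int.toStr mn ++ "–" ++ PySem.Int.toStr mx ++
  "; skip section entirely if fewer than " ++ PySem.Int.toStr mn ++ " qualifying items exist today"

def pvHeader : String :=
  "## Required priority sections\n\n" ++ pvHdr1 ++ "\n\n" ++ pvHdr2 ++ "\n\n"

def sections_block_py_alt (sections : Option (List (List (String × String)))) : String :=
  match sections with
  | none => ""
  | some secs =>
    if secs = [] then ""
    else
      let blocks := [("after_tldr", pvDesc1), ("topic", pvDesc2), ("after_topics", pvDesc3)].flatMap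
        (fun kd => (secs.filter (fun s => pvNorm s == kd.1)).map (fun s => pvBlock s kd.2))
      pvHeader ++ PySem.Str.join "\n\n" blocks ++ "\n"

-- ===== PRECONDITION & SPEC =====
def pvOkInt (v : Option String) : Bool :=
  match v with
  | some s => (PySem.Int.ofStr? s).isSome
  | none => true

-- Pre_ excludes exactly the inputs where Python's int() raises ValueError on a present
-- "min"/"max" field that is not an int literal; A raises there, so nothing is claimed.
def Pre_sections_block_py (sections : Option (List (List (String × String)))) : Prop :=
  (sections.getD []).all (fun s => pvOkInt (pvGet s "min") && pvOkInt (pvGet s "max")) = true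

instance (sections : Option (List (List (String × String)))) : Decidable (Pre_sections_block_py sections) := by
  unfold Pre_sections_block_py; infer_instance

def pvWitness_sections_block_py : (Option (List (List (String × String)))) :=
  some [[("name", "Rust"), ("placement", "TOPIC"), ("min", "2")], [("when", "always")]]

def Spec_sections_block_py (sections : Option (List (List (String × String)))) (out : String) : Prop := out = sections_block_py_alt sections
instance (sections : Option (List (List (String × String)))) (out : String) : Decidable (Spec_sections_block_py sections out) := by unfold Spec_sections_block_py; infer_instance

-- ===== CLAIM (what is proved, stated in full; the proofs are below) =====
def Claim_equal_sections_block_py : Prop := ∀ (sections : Option (List (List (String × String)))), Dom_sections_block_py sections → Pre_sections_block_py sections → Spec_sections_block_py sections (sections_block_py sections)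

-- ===== LEMMAS AND PROOFS =====

-- pvNorm always lands on one of the three keys
theorem pvNorm_def (s : List (String × String)) :
    pvNorm s = if PySem.Str.lower (pvOr (pvGet s "placement") "after_topics") = "after_tldr" ∨
        PySem.Str.lower (pvOr (pvGet s "placement") "after_topics") = "topic" ∨
        PySem.Str.lower (pvOr (pvGet s "placement") "after_topics") = "after_topics"
      then PySem.Str.lower (pvOr (pvGet s "placement") "after_topics") else "after_topics" := rfl

theorem pvNorm_mem (s : List (String × String)) :
    pvNorm s = "after_tldr" ∨ pvNorm s = "topic" ∨ pvNorm s = "after_topics" := by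
  rw [pvNorm_def]
  split_ifs with h
  · exact h
  · right; right; rfl

-- invariant of A's grouping dict: its keys are exactly the three placement keys
def pvInv (d : PySem.Dict String (List (List (String × String)))) : Prop :=
  ∀ k : String, d.contains k = (k == "after_tldr" || k == "topic" || k == "after_topics")

theorem pvInv_init :
    pvInv (((PySem.Dict.empty.insert "after_tldr" []).insert "topic" []).insert "after_topics"
      ([] : List (List (String × String)))) := by
  intro k
  simp only [PySem.Dict.contains_insert]
  have he : (PySem.Dict.empty : PySem.Dict String (List (List (String × String)))).contains k = false := by
    simp [PySem.Dict.contains, PySem.Dict.empty]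
  rw [he]
  cases h1 : (k == "after_tldr") <;> cases h2 : (k == "topic") <;> cases h3 : (k == "after_topics") <;> simp [h1, h2, h3]

theorem pvStepA_def (d : PySem.Dict String (List (List (String × String)))) (s : List (String × String)) :
    pvStepA d s = d.modify
      (if d.contains (PySem.Str.lower (pvOr (pvGet s "placement") "after_topics"))
        then PySem.Str.lower (pvOr (pvGet s "placement") "after_topics") else "after_topics")
      [] (fun l => l ++ [s]) := rfl

theorem pvStepA_key (d : PySem.Dict String (List (List (String × String)))) (s : List (String × String))
    (h : pvInv d) : pvStepA d s = d.modify (pvNorm s) [] (fun l => l ++ [s]) := by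
  rw [pvStepA_def, pvNorm_def]
  rw [h (PySem.Str.lower (pvOr (pvGet s "placement") "after_topics"))]
  by_cases hp : PySem.Str.lower (pvOr (pvGet s "placement") "after_topics") = "after_tldr" ∨
      PySem.Str.lower (pvOr (pvGet s "placement") "after_topics") = "topic" ∨
      PySem.Str.lower (pvOr (pvGet s "placement") "after_topics") = "after_topics"
  · have : ((PySem.Str.lower (pvOr (pvGet s "placement") "after_topics") == "after_tldr") ||
        (PySem.Str.lower (pvOr (pvGet s "placement") "after_topics") == "topic") ||
        (PySem.Str.lower (pvOr (pvGet s "placement") "after_topics") == "after_topics")) = true := by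
      simp only [Bool.or_eq_true, beq_iff_eq]; tauto
    rw [this, if_pos rfl, if_pos hp]
  · have : ((PySem.Str.lower (pvOr (pvGet s "placement") "after_topics") == "after_tldr") ||
        (PySem.Str.lower (pvOr (pvGet s "placement") "after_topics") == "topic") ||
        (PySem.Str.lower (pvOr (pvGet s "placement") "after_topics") == "after_topics")) = false := by
      simp only [Bool.or_eq_false_iff, beq_eq_false_iff_ne, ne_eq]; tauto
    rw [this, if_neg (by simp), if_neg hp]

theorem pvInv_step (d : PySem.Dict String (List (List (String × String)))) (s : List (String × String))
    (h : pvInv d) : pvInv (pvStepA d s) := by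
  rw [pvStepA_key d s h]
  intro k
  unfold PySem.Dict.modify
  rw [PySem.Dict.contains_insert, h k]
  rcases pvNorm_mem s with hn | hn | hn <;> rw [hn] <;>
    cases h1 : (k == "after_tldr") <;> cases h2 : (k == "topic") <;> cases h3 : (k == "after_topics") <;>
    simp_all

-- the grouping loop's bucket at c is the filter of the input by normalized placement
theorem pvBucket (l : List (List (String × String))) (d : PySem.Dict String (List (List (String × String))))
    (h : pvInv d) (c : String) :
    (l.foldl pvStepA d).getD c [] = d.getD c [] ++ l.filter (fun s => pvNorm s == c) := by
  induction l generalizing d with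
  | nil => simp
  | cons s t ih =>
    rw [List.foldl_cons, ih (pvStepA d s) (pvInv_step d s h), pvStepA_key d s h]
    unfold PySem.Dict.modify
    rw [PySem.Dict.getD_insert]
    by_cases hc : c = pvNorm s
    · rw [if_pos hc, List.filter_cons, if_pos (by simp [hc]), hc, List.append_assoc]
      simp
    · rw [if_neg hc, List.filter_cons, if_neg (by simp [beq_iff_eq]; exact fun e => hc e.symm)]

theorem pvInit_getD (c : String) :
    ((((PySem.Dict.empty.insert "after_tldr" []).insert "topic" []).insert "after_topics"
      ([] : List (List (String × String)))).getD c []) = [] := by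
  rw [PySem.Dict.getD_insert, PySem.Dict.getD_insert, PySem.Dict.getD_insert]
  split_ifs <;> simp [PySem.Dict.getD, PySem.Dict.get?, PySem.Dict.empty]

-- join over a nonempty tail, Chars level
theorem pvJoin_cons (sep p : List Char) (ps : List (List Char)) (h : ps ≠ []) :
    PySem.Chars.join sep (p :: ps) = p ++ sep ++ PySem.Chars.join sep ps := by
  cases ps with
  | nil => exact absurd rfl h
  | cons q r => exact PySem.Chars.join_cons_cons sep p q r

-- rstrip facts
theorem pvRstrip_ws (u : List Char) (c : Char) (h : PySem.Chars.isspace c = true) :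
    PySem.Chars.rstrip (u ++ [c]) = PySem.Chars.rstrip u := by
  simp [PySem.Chars.rstrip, List.reverse_append, List.dropWhile, h]

theorem pvRstrip_last (u : List Char) (c : Char) (h : PySem.Chars.isspace c = false) :
    PySem.Chars.rstrip (u ++ [c]) = u ++ [c] := by
  simp [PySem.Chars.rstrip, List.reverse_append, List.dropWhile, h]

-- the core line-list ↔ block reshaping, Chars level
theorem pvJoinBlocks {X : Type} (f1 f2 f3 f4 f5 : X → List Char) (z : List X) (hz : z ≠ []) :
    PySem.Chars.join ['\n'] (z.flatMap (fun x => [f1 x, f2 x, f3 x, f4 x, f5 x, []])) =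
    PySem.Chars.join ['\n', '\n']
      (z.map (fun x => f1 x ++ '\n' :: f2 x ++ '\n' :: f3 x ++ '\n' :: f4 x ++ '\n' :: f5 x)) ++ ['\n'] := by
  induction z with
  | nil => exact absurd rfl hz
  | cons x t ih =>
    cases t with
    | nil =>
      simp [PySem.Chars.join_cons_cons, PySem.Chars.join_singleton]
    | cons y r =>
      have hne : (y :: r).flatMap (fun x => [f1 x, f2 x, f3 x, f4 x, f5 x, []]) ≠ [] := by
        simp
      rw [List.flatMap_cons]
      rw [List.cons_append, List.cons_append, List.cons_append, List.cons_append,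
        List.cons_append, List.cons_append, List.nil_append]
      rw [PySem.Chars.join_cons_cons, PySem.Chars.join_cons_cons, PySem.Chars.join_cons_cons,
        PySem.Chars.join_cons_cons, PySem.Chars.join_cons_cons,
        pvJoin_cons _ _ _ hne]
      rw [ih (List.cons_ne_nil _ _)]
      conv_rhs => rw [List.map_cons, pvJoin_cons _ _ _ (by simp : List.map (fun x => f1 x ++ '\n' :: f2 x ++ '\n' :: f3 x ++ '\n' :: f4 x ++ '\n' :: f5 x) (y :: r) ≠ [])]
      simp [List.append_assoc]

-- every block ends in a non-whitespace character ('y' of "today")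
theorem pvJoin_ends {Y : Type} (g : Y → List Char) (sep : List Char)
    (hg : ∀ x : Y, ∃ u, g x = u ++ ['y']) (z : List Y) (hz : z ≠ []) :
    ∃ u, PySem.Chars.join sep (z.map g) = u ++ ['y'] := by
  induction z with
  | nil => exact absurd rfl hz
  | cons x t ih =>
    cases t with
    | nil =>
      rcases hg x with ⟨u, hu⟩
      exact ⟨u, by simpa [PySem.Chars.join_singleton] using hu⟩
    | cons y r =>
      rcases ih (List.cons_ne_nil _ _) with ⟨u, hu⟩
      refine ⟨g x ++ sep ++ u, ?_⟩
      rw [List.map_cons, pvJoin_cons sep _ _ (by simp), hu]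
      simp [List.append_assoc]

theorem pvEndsAppend (a b : List Char) (h : ∃ u, b = u ++ ['y']) : ∃ u, a ++ b = u ++ ['y'] := by
  rcases h with ⟨u, hu⟩
  exact ⟨a ++ u, by rw [hu, List.append_assoc]⟩

theorem pvEndsCons (c : Char) (b : List Char) (h : ∃ u, b = u ++ ['y']) : ∃ u, c :: b = u ++ ['y'] := by
  rcases h with ⟨u, hu⟩
  exact ⟨c :: u, by rw [hu]; rfl⟩

theorem pvBlock_toList (s : List (String × String)) (d : String) :
    (pvBlock s d).toList =
      ("### " ++ pvOr (pvGet s "name") "(unnamed section)").toList ++ '\n' ::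
      ("- **Placement**: " ++ d).toList ++ '\n' ::
      ("- **When**: " ++ pvOr (pvGet s "when") "(no criteria specified — skip if unclear)").toList ++ '\n' ::
      ("- **Shape**: " ++ pvOr (pvGet s "shape") "paragraph, prose, cite items inline as `[Title](link)`").toList ++ '\n' ::
      ("- **Items**: " ++ PySem.Int.toStr (pvIntOf (pvGet s "min") 1) ++ "–" ++ PySem.Int.toStr (pvIntOf (pvGet s "max") 5) ++
        "; skip section entirely if fewer than " ++ PySem.Int.toStr (pvIntOf (pvGet s "min") 1) ++ " qualifying items exist today").toList := by
  unfold pvBlock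
  simp only [String.toList_append]
  rw [show ("\n- **Placement**: ").toList = '\n' :: ("- **Placement**: ").toList from by decide,
    show ("\n- **When**: ").toList = '\n' :: ("- **When**: ").toList from by decide,
    show ("\n- **Shape**: ").toList = '\n' :: ("- **Shape**: ").toList from by decide,
    show ("\n- **Items**: ").toList = '\n' :: ("- **Items**: ").toList from by decide]
  simp

-- ===== per-section line/block functions, named so goals stay small =====

def pvF1 (p : List (String × String) × String) : List Char :=
  ("### " ++ pvOr (pvGet p.1 "name") "(unnamed section)").toList
def pvF2 (p : List (String × String) × String) : List Char :=
  ("- **Placement**: " ++ pvDesc p.2).toList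
def pvF3 (p : List (String × String) × String) : List Char :=
  ("- **When**: " ++ pvOr (pvGet p.1 "when") "(no criteria specified — skip if unclear)").toList
def pvF4 (p : List (String × String) × String) : List Char :=
  ("- **Shape**: " ++ pvOr (pvGet p.1 "shape") "paragraph, prose, cite items inline as `[Title](link)`").toList
def pvF5 (p : List (String × String) × String) : List Char :=
  ("- **Items**: " ++ PySem.Int.toStr (pvIntOf (pvGet p.1 "min") 1) ++ "–" ++ PySem.Int.toStr (pvIntOf (pvGet p.1 "max") 5) ++
    "; skip section entirely if fewer than " ++ PySem.Int.toStr (pvIntOf (pvGet p.1 "min") 1) ++ " qualifying items exist today").toList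

theorem pvLinesA_map (p : List (String × String) × String) :
    List.map String.toList (pvLinesA p.1 p.2) = [pvF1 p, pvF2 p, pvF3 p, pvF4 p, pvF5 p, []] := rfl

theorem pvBlockG (p : List (String × String) × String) :
    (pvBlock p.1 (pvDesc p.2)).toList =
      pvF1 p ++ '\n' :: pvF2 p ++ '\n' :: pvF3 p ++ '\n' :: pvF4 p ++ '\n' :: pvF5 p := by
  have h := pvBlock_toList p.1 (pvDesc p.2)
  exact h

theorem pvF5_ends (p : List (String × String) × String) : ∃ u, pvF5 p = u ++ ['y'] := by
  unfold pvF5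
  simp only [String.toList_append]
  apply pvEndsAppend
  exact ⟨(" qualifying items exist toda").toList, by decide⟩

-- rstrip (X ++ (u ++ ['y']) ++ ['\n']) ++ ['\n'] = the same string: rstrip only eats the final newline
theorem pvRstripFix (a u : List Char) :
    PySem.Chars.rstrip (a ++ (u ++ ['y']) ++ ['\n']) ++ ['\n'] = a ++ (u ++ ['y']) ++ ['\n'] := by
  have h1 : a ++ (u ++ ['y']) ++ ['\n'] = ((a ++ u) ++ ['y']) ++ ['\n'] := by
    simp [List.append_assoc]
  rw [h1, pvRstrip_ws _ '\n' (by decide), pvRstrip_last _ 'y' (by decide)]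

-- the whole assembly, abstract in the per-section line functions
theorem pvAssemble {X : Type} (f1 f2 f3 f4 f5 : X → List Char) (t0 h1 h2 : List Char)
    (z : List X) (hz : z ≠ []) (hy : ∀ x, ∃ u, f5 x = u ++ ['y']) :
    PySem.Chars.rstrip (PySem.Chars.join ['\n']
        (t0 :: [] :: h1 :: [] :: h2 :: [] :: z.flatMap (fun x => [f1 x, f2 x, f3 x, f4 x, f5 x, []]))) ++ ['\n'] =
      t0 ++ ['\n', '\n'] ++ h1 ++ ['\n', '\n'] ++ h2 ++ ['\n', '\n'] ++
        PySem.Chars.join ['\n', '\n']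
          (z.map (fun x => f1 x ++ '\n' :: f2 x ++ '\n' :: f3 x ++ '\n' :: f4 x ++ '\n' :: f5 x)) ++ ['\n'] := by
  have hL : z.flatMap (fun x => [f1 x, f2 x, f3 x, f4 x, f5 x, []]) ≠ [] := by
    cases z with
    | nil => exact absurd rfl hz
    | cons a t => simp
  rw [pvJoin_cons _ _ _ (by simp [hL]), pvJoin_cons _ _ _ (by simp [hL]),
    pvJoin_cons _ _ _ (by simp [hL]), pvJoin_cons _ _ _ (by simp [hL]),
    pvJoin_cons _ _ _ (by simp [hL]), pvJoin_cons _ _ _ hL]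
  rw [pvJoinBlocks f1 f2 f3 f4 f5 z hz]
  have hGy : ∀ x, ∃ u, (f1 x ++ '\n' :: f2 x ++ '\n' :: f3 x ++ '\n' :: f4 x ++ '\n' :: f5 x) = u ++ ['y'] := by
    intro x
    repeat first
      | apply pvEndsAppend
      | apply pvEndsCons
    exact hy x
  obtain ⟨u, hu⟩ := pvJoin_ends _ ['\n', '\n'] hGy z hz
  rw [hu]
  have key : t0 ++ ['\n'] ++ ([] ++ ['\n'] ++ (h1 ++ ['\n'] ++ ([] ++ ['\n'] ++
        (h2 ++ ['\n'] ++ ([] ++ ['\n'] ++ (u ++ ['y'] ++ ['\n']))))))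
      = (t0 ++ ['\n', '\n'] ++ h1 ++ ['\n', '\n'] ++ h2 ++ ['\n', '\n']) ++ (u ++ ['y']) ++ ['\n'] := by
    simp [List.append_assoc]
  rw [key, pvRstripFix]

theorem pvDesc_eval1 : pvDesc "after_tldr" = pvDesc1 := by simp [pvDesc]
theorem pvDesc_eval2 : pvDesc "topic" = pvDesc2 := by simp [pvDesc]
theorem pvDesc_eval3 : pvDesc "after_topics" = pvDesc3 := by simp [pvDesc]

theorem pvHeader_toList : (pvHeader).toList =
    ("## Required priority sections").toList ++ ['\n', '\n'] ++ pvHdr1.toList ++ ['\n', '\n'] ++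
      pvHdr2.toList ++ ['\n', '\n'] := by
  unfold pvHeader
  simp only [String.toList_append]
  rw [show ("## Required priority sections\n\n").toList = ("## Required priority sections").toList ++ ['\n', '\n'] from by decide,
    show ("\n\n" : String).toList = ['\n', '\n'] from by decide]

theorem sections_block_py_spec : Claim_equal_sections_block_py := by
  unfold Claim_equal_sections_block_py
  intro sections _ _
  unfold Spec_sections_block_py
  cases sections with
  | none => rfl
  | some secs =>
    unfold sections_block_py sections_block_py_alt
    by_cases hnil : secs = []
    · simp [hnil]
    · simp only [if_neg hnil]
      -- A's buckets are the filters
      have hb : ∀ c : String,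
          ((secs.foldl pvStepA (((PySem.Dict.empty.insert "after_tldr" []).insert "topic" []).insert "after_topics" [])).getD c [])
            = secs.filter (fun s => pvNorm s == c) := by
        intro c
        rw [pvBucket secs _ pvInv_init c, pvInit_getD c, List.nil_append]
      -- the pair list of all emitted sections, in placement-group order
      set z := (secs.filter (fun s => pvNorm s == "after_tldr")).map (fun s => (s, "after_tldr")) ++
        (secs.filter (fun s => pvNorm s == "topic")).map (fun s => (s, "topic")) ++
        (secs.filter (fun s => pvNorm s == "after_topics")).map (fun s => (s, "after_topics")) with hzdef
      -- flatten A's nested foldl into a line list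
      have hlines : ∀ (lines0 : List String),
          (["after_tldr", "topic", "after_topics"].foldl
            (fun lines key =>
              ((secs.foldl pvStepA (((PySem.Dict.empty.insert "after_tldr" []).insert "topic" []).insert "after_topics" [])).getD key []).foldl
                (fun lines s => lines ++ pvLinesA s key) lines) lines0)
          = lines0 ++ z.flatMap (fun p => pvLinesA p.1 p.2) := by
        intro lines0
        rw [hzdef]
        simp only [PySem.List.foldl_append_eq_flatMap, List.foldl_cons, List.foldl_nil, hb]
        simp [List.flatMap_append, List.flatMap_map, List.append_assoc]
      rw [hlines]
      -- the pair list is nonempty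
      have hzne : z ≠ [] := by
        rw [hzdef]
        intro hcontr
        rcases List.exists_mem_of_ne_nil secs hnil with ⟨s0, hs0⟩
        rcases List.append_eq_nil_iff.mp hcontr with ⟨h12, h3⟩
        rcases List.append_eq_nil_iff.mp h12 with ⟨h1, h2⟩
        rcases pvNorm_mem s0 with hn | hn | hn
        · have := List.filter_eq_nil_iff.mp (List.map_eq_nil_iff.mp h1) s0 hs0; simp [hn] at this
        · have := List.filter_eq_nil_iff.mp (List.map_eq_nil_iff.mp h2) s0 hs0; simp [hn] at this
        · have := List.filter_eq_nil_iff.mp (List.map_eq_nil_iff.mp h3) s0 hs0; simp [hn] at this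
      -- B's blocks are the map of pvBlock over z
      have hblocks : ([("after_tldr", pvDesc1), ("topic", pvDesc2), ("after_topics", pvDesc3)].flatMap
            (fun kd => (secs.filter (fun s => pvNorm s == kd.1)).map (fun s => pvBlock s kd.2)))
          = z.map (fun p => pvBlock p.1 (pvDesc p.2)) := by
        rw [hzdef]
        simp [List.map_append, List.map_map, Function.comp_def, pvDesc_eval1, pvDesc_eval2, pvDesc_eval3]
      rw [hblocks]
      -- now a pure string identity; move to List Char
      apply String.toList_inj.mp
      simp only [String.toList_append, PySem.Str.toList_rstrip, PySem.Str.toList_join]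
      rw [show ("\n" : String).toList = ['\n'] from by decide,
        show ("\n\n" : String).toList = ['\n', '\n'] from by decide]
      -- A's line list, as toLists
      rw [show List.map String.toList
            (["## Required priority sections", "", pvHdr1, "", pvHdr2, ""] ++ z.flatMap (fun p => pvLinesA p.1 p.2))
          = ("## Required priority sections").toList :: [] :: pvHdr1.toList :: [] :: pvHdr2.toList :: [] ::
            z.flatMap (fun p => [pvF1 p, pvF2 p, pvF3 p, pvF4 p, pvF5 p, []]) from by
        rw [List.map_append, List.map_flatMap]
        simp only [pvLinesA_map]
        simp]
      rw [pvAssemble pvF1 pvF2 pvF3 pvF4 pvF5 _ _ _ z hzne pvF5_ends]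
      -- B's blocks, as toLists
      rw [show List.map String.toList (z.map (fun p => pvBlock p.1 (pvDesc p.2)))
          = z.map (fun x => pvF1 x ++ '\n' :: pvF2 x ++ '\n' :: pvF3 x ++ '\n' :: pvF4 x ++ '\n' :: pvF5 x) from by
        rw [List.map_map]
        apply List.map_congr_left
        intro p _
        exact pvBlockG p]
      rw [pvHeader_toList]
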